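-- pv_equiv track=rewrite | github.com/Kapo4eso4i/CodeWars | Multi-tap Keypad Text Entry on an Old Mobile Phone.py | presses
-- ===== SOURCE A (Python) =====
-- def presses(phrase):
--     keypad =  ['1', 'abc2', 'def3',
--                'ghi4', 'jkl5', 'mno6',
--                'pqrs7', 'tuv8', 'wxyz9',
--                ' 0', '*', '#']
--     counter = 0
--     phrase = phrase.lower()
--     for char in phrase:
--         for key in keypad:
--             if char in key:
--                 for i in range(len(key)):
--                     if char == key[i]:
--                         counter += i+1
--     return counter
-- ===== SOURCE B (Python) =====
-- def presses(phrase):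
--     keypad = ['1', 'abc2', 'def3',
--               'ghi4', 'jkl5', 'mno6',
--               'pqrs7', 'tuv8', 'wxyz9',
--               ' 0', '*', '#']
--     # Stage 1: count how often each character occurs in the lowered phrase.
--     freq = {}
--     for ch in phrase.lower():
--         freq[ch] = freq.get(ch, 0) + 1
--     # Stage 2: iterate over the keypad (not the phrase): position i on a key
--     # costs i+1 presses per occurrence of that character in the phrase.
--     total = 0
--     for key in keypad:
--         for i, ch in enumerate(key):
--             total += (i + 1) * freq.get(ch, 0)
--     return total
-- ===== Notes on version B (the rewrite author's own statement) =====
-- stated objective: faster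
-- what changed: B inverts the traversal: it builds a frequency counter of the lowered phrase once, then iterates over the keypad positions and sums (i+1)*freq[ch] (a count-then-dot-product scheme), instead of A's per-phrase-character triple-nested rescan of the keypad.
import Mathlib
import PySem

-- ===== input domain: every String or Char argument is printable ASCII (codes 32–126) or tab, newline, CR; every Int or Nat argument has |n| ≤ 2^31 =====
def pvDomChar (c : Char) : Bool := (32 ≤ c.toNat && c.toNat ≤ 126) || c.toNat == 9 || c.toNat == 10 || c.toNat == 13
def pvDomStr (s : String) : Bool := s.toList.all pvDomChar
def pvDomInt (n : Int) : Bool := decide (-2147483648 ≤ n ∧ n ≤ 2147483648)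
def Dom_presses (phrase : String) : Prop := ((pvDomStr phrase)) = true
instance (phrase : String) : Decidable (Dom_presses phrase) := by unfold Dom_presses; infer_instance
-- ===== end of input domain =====

-- B inverts the traversal: it counts phrase characters once, then sums (i+1)*freq over keypad positions (alternative decomposition).

-- ===== PORT A =====
def pvKeypad : List String :=
  ["1", "abc2", "def3", "ghi4", "jkl5", "mno6", "pqrs7", "tuv8", "wxyz9", " 0", "*", "#"]

def presses (phrase : String) : Int :=
  let phrase := PySem.Str.lower phrase
  phrase.toList.foldl (fun counter char =>
    pvKeypad.foldl (fun counter key =>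
      if key.toList.contains char then
        (PySem.List.pyRange 0 (PySem.Chars.len key.toList) 1).foldl
          -- key[i]: i is always in range here, so the pyGetD default 'a' is never used
          (fun counter i => if char = PySem.List.pyGetD key.toList i 'a' then counter + (i + 1) else counter)
          counter
      else counter) counter) 0

-- ===== PORT B =====
def presses_alt (phrase : String) : Int :=
  let freq : PySem.Dict Char Int :=
    (PySem.Str.lower phrase).toList.foldl
      (fun d ch => d.insert ch (d.getD ch 0 + 1)) PySem.Dict.empty
  pvKeypad.foldl (fun total key =>
    (PySem.List.enumerate key.toList).foldl
      (fun total p => total + (p.1 + 1) * freq.getD p.2 0) total) 0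

-- ===== PRECONDITION & SPEC =====
def Spec_presses (phrase : String) (out : Int) : Prop := out = presses_alt phrase
instance (phrase : String) (out : Int) : Decidable (Spec_presses phrase out) := by unfold Spec_presses; infer_instance

-- ===== CLAIM (what is proved, stated in full; the proofs are below) =====
def Claim_equal_presses : Prop := ∀ (phrase : String), Dom_presses phrase → Spec_presses phrase (presses phrase)

-- ===== LEMMAS AND PROOFS =====

-- indicator cost of character c at keypad position p
def pvG (c : Char) (p : Int × Char) : Int := if c = p.2 then p.1 + 1 else 0

-- A's per-character contribution from one key, as a pure function
def pvInnerA (c : Char) (key : String) : Int :=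
  if key.toList.contains c then
    ((PySem.List.pyRange 0 (PySem.Chars.len key.toList) 1).map
      (fun i => if c = PySem.List.pyGetD key.toList i 'a' then i + 1 else 0)).sum
  else 0

def pvFA (c : Char) : Int := (pvKeypad.map (pvInnerA c)).sum

-- generic: a guarded accumulating fold is init + a sum
theorem pv_foldl_if_add {α : Type} (l : List α) (p : α → Prop) [DecidablePred p]
    (g : α → Int) (a : Int) :
    l.foldl (fun acc x => if p x then acc + g x else acc) a
      = a + (l.map (fun x => if p x then g x else 0)).sum := by
  rw [PySem.List.foldl_congr_mem
        (g := fun acc x => acc + (if p x then g x else 0))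
        (h := by intro acc x _; by_cases hx : p x <;> simp [hx])]
  exact PySem.List.foldl_add _ _ _

theorem pv_stepA (counter : Int) (c : Char) :
    pvKeypad.foldl (fun counter key =>
      if key.toList.contains c then
        (PySem.List.pyRange 0 (PySem.Chars.len key.toList) 1).foldl
          (fun counter i => if c = PySem.List.pyGetD key.toList i 'a' then counter + (i + 1) else counter)
          counter
      else counter) counter = counter + pvFA c := by
  have h1 : ∀ (acc : Int) (key : String), key ∈ pvKeypad →
      (if key.toList.contains c then
        (PySem.List.pyRange 0 (PySem.Chars.len key.toList) 1).foldl
          (fun counter i => if c = PySem.List.pyGetD key.toList i 'a' then counter + (i + 1) else counter)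
          acc
      else acc) = acc + pvInnerA c key := by
    intro acc key _
    unfold pvInnerA
    split_ifs with h
    · rw [pv_foldl_if_add]
    · ring
  rw [PySem.List.foldl_congr_mem (g := fun acc key => acc + pvInnerA c key) (h := h1)]
  rw [PySem.List.foldl_add]
  rfl

theorem pvA_eq (phrase : String) :
    presses phrase = ((PySem.Str.lower phrase).toList.map pvFA).sum := by
  unfold presses
  rw [PySem.List.foldl_congr_mem (g := fun acc c => acc + pvFA c)
        (h := by intro acc c _; exact pv_stepA acc c)]
  rw [PySem.List.foldl_add]
  ring

-- A's per-key contribution equals the indicator sum over that key's enumerated positions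
theorem pv_inner_eq (c : Char) (key : String) :
    pvInnerA c key = ((PySem.List.enumerate key.toList).map (pvG c)).sum := by
  unfold pvInnerA
  by_cases h : key.toList.contains c
  · rw [if_pos h, PySem.List.enumerate_eq_map_pyRange (d := 'a'), List.map_map]
    rfl
  · rw [if_neg h]
    symm
    apply List.sum_eq_zero
    intro x hx
    obtain ⟨p, hp, rfl⟩ := List.mem_map.mp hx
    obtain ⟨k, hk, rfl⟩ := (PySem.List.mem_enumerate_iff _ _ _).mp hp
    have hmem : key.toList[k] ∈ key.toList := List.getElem_mem hk
    have hne : c ≠ key.toList[k] := by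
      intro hEq; exact h (by simp [hEq])
    simp [pvG, hne]

-- k * count as an indicator sum over the list
theorem pv_sum_ite (l : List Char) (x : Char) (k : Int) :
    (l.map (fun c => if c = x then k else 0)).sum = k * l.count x := by
  induction l with
  | nil => simp
  | cons c cs ih =>
    by_cases h : c = x
    · simp [h, ih]; ring
    · simp [h, ih]

-- swap a finite double sum
theorem pv_sum_swap {α β : Type} (l1 : List α) (l2 : List β) (f : α → β → Int) :
    (l1.map (fun a => (l2.map (f a)).sum)).sum
      = (l2.map (fun b => (l1.map (fun a => f a b)).sum)).sum := by
  induction l1 with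
  | nil => simp
  | cons x xs ih =>
    simp only [List.map_cons, List.sum_cons, ih]
    rw [← List.sum_map_add]

-- B as a double sum over keypad positions of (i+1) * count
theorem pvB_eq (phrase : String) :
    presses_alt phrase
      = (pvKeypad.map (fun key =>
          ((PySem.List.enumerate key.toList).map
            (fun p => (p.1 + 1) * ((PySem.Str.lower phrase).toList.count p.2 : Int))).sum)).sum := by
  unfold presses_alt
  rw [PySem.Dict.foldl_insert_getD_add_one_eq_counter]
  rw [PySem.List.foldl_congr_mem
        (g := fun total key => total +
          ((PySem.List.enumerate key.toList).map
            (fun p => (p.1 + 1) * ((PySem.Str.lower phrase).toList.count p.2 : Int))).sum)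
        (h := by
          intro acc key _
          rw [PySem.List.foldl_add]
          congr 1
          refine congrArg List.sum (List.map_congr_left ?_)
          intro p _
          rw [PySem.Dict.getD_counter])]
  rw [PySem.List.foldl_add]
  ring

-- ===== VERDICT (by name: the statement is the Claim_ definition above) =====
theorem presses_spec : Claim_equal_presses := by
  intro phrase _
  unfold Spec_presses
  rw [pvA_eq, pvB_eq]
  set l := (PySem.Str.lower phrase).toList with hl
  calc (l.map pvFA).sum
      = (l.map (fun c => (pvKeypad.map (fun key =>
          ((PySem.List.enumerate key.toList).map (pvG c)).sum)).sum)).sum := by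
        refine congrArg List.sum (List.map_congr_left ?_)
        intro c _
        unfold pvFA
        exact congrArg List.sum (List.map_congr_left (fun key _ => pv_inner_eq c key))
    _ = (pvKeypad.map (fun key => (l.map (fun c =>
          ((PySem.List.enumerate key.toList).map (pvG c)).sum)).sum)).sum :=
        pv_sum_swap l pvKeypad _
    _ = (pvKeypad.map (fun key =>
          ((PySem.List.enumerate key.toList).map
            (fun p => (p.1 + 1) * (l.count p.2 : Int))).sum)).sum := by
        refine congrArg List.sum (List.map_congr_left ?_)
        intro key _
        rw [pv_sum_swap]
        refine congrArg List.sum (List.map_congr_left ?_)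
        intro p _
        simpa [pvG] using pv_sum_ite l p.2 (p.1 + 1)
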